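-- pv_equiv track=rewrite | github.com/ghostrider77/BioinformaticsProblems | Python/textbook_track/chapter11/ba11d.py | restore_peptide_from_peptide_vector
-- ===== SOURCE A (Python) =====
-- def reverse_mass_table_mapping(mass_table):
--     return {mass: amino_acid for amino_acid, mass in mass_table.items()}
--
-- def calc_prefix_masses(peptide_vector):
--     prefix_masses = [0]
--     for ix, item in enumerate(peptide_vector, start=1):
--         if item == 1:
--             prefix_masses.append(ix)
--     return prefix_masses
--
-- def restore_peptide_from_peptide_vector(peptide_vector, mass_table):
--     prefix_masses = calc_prefix_masses(peptide_vector)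
--     inverse_mapping = reverse_mass_table_mapping(mass_table)
--     peptide = []
--     for mass1, mass2 in zip(prefix_masses, prefix_masses[1:]):
--         mass = mass2 - mass1
--         if (amino_acid := inverse_mapping.get(mass)) is None:
--             return None
--         peptide.append(amino_acid)
--     return ''.join(peptide)
-- ===== SOURCE B (Python) =====
-- def restore_peptide_from_peptide_vector(peptide_vector, mass_table):
--     inverse_mapping = {mass: amino_acid for amino_acid, mass in mass_table.items()}
--     peptide = []
--     counter = 0
--     for item in peptide_vector:
--         counter += 1
--         if item == 1:
--             amino_acid = inverse_mapping.get(counter)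
--             if amino_acid is None:
--                 return None
--             peptide.append(amino_acid)
--             counter = 0
--     return ''.join(peptide)
-- ===== Notes on version B (the rewrite author's own statement) =====
-- stated objective: simpler
-- what changed: Replaces the two-pass scheme (materialise the prefix-mass positions list, then zip-and-diff consecutive pairs) with a single pass over peptide_vector that keeps a running gap counter reset at each 1, looking each gap up directly.
import Mathlib
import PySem

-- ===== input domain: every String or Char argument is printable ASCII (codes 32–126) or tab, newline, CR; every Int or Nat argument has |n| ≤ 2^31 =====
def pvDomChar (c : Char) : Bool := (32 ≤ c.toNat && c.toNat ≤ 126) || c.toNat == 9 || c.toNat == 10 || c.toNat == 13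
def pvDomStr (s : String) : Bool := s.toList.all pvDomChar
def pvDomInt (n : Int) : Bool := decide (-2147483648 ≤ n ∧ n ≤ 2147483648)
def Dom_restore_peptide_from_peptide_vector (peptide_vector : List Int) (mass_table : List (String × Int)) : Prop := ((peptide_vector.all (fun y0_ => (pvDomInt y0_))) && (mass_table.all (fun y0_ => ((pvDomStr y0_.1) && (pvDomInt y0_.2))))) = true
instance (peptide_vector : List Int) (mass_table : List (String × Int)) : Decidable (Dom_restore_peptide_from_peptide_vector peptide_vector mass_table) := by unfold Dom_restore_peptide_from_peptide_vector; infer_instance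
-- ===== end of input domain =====

-- B fuses A's two passes (positions list + consecutive diffs) into one counter-driven pass; objective: simpler.


-- ===== PORT A =====
-- reverse_mass_table_mapping: {mass: amino_acid for amino_acid, mass in mass_table.items()}
-- (both Pythons contain this identical comprehension, so both ports share this helper)
def pvInverseMapping (mass_table : List (String × Int)) : PySem.Dict Int String :=
  (PySem.Dict.ofList mass_table).items.foldl (fun d p => d.insert p.2 p.1) PySem.Dict.empty

-- the loop of calc_prefix_masses: for ix, item in enumerate(peptide_vector, start=1): if item == 1: append ix
def pvCalcPrefixGo (ix : Int) (v : List Int) (acc : List Int) : List Int :=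
  match v with
  | [] => acc
  | item :: rest => pvCalcPrefixGo (ix + 1) rest (if item == 1 then acc ++ [ix] else acc)

def calc_prefix_masses (peptide_vector : List Int) : List Int :=
  pvCalcPrefixGo 1 peptide_vector [0]

-- the main loop of A: for mass1, mass2 in zip(pm, pm[1:]) with early 'return None'
def pvALoop (inv : PySem.Dict Int String) (pairs : List (Int × Int)) (acc : List String) : Option (List String) :=
  match pairs with
  | [] => some acc
  | (mass1, mass2) :: rest =>
    match inv.get? (mass2 - mass1) with
    | none => none
    | some amino_acid => pvALoop inv rest (acc ++ [amino_acid])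

def restore_peptide_from_peptide_vector (peptide_vector : List Int) (mass_table : List (String × Int)) : Option String :=
  let prefix_masses := calc_prefix_masses peptide_vector
  let inverse_mapping := pvInverseMapping mass_table
  (pvALoop inverse_mapping (prefix_masses.zip prefix_masses.tail) []).map
    (fun peptide => PySem.Str.join "" peptide)

-- ===== PORT B =====
-- B's single loop: counter += 1; on item == 1 look up the counter and reset it, with early 'return None'
def pvBLoop (inv : PySem.Dict Int String) (v : List Int) (counter : Int) (acc : List String) : Option (List String) :=
  match v with
  | [] => some acc
  | item :: rest =>
    let c' := counter + 1
    if item == 1 then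
      match inv.get? c' with
      | none => none
      | some amino_acid => pvBLoop inv rest 0 (acc ++ [amino_acid])
    else pvBLoop inv rest c' acc

def restore_peptide_from_peptide_vector_alt (peptide_vector : List Int) (mass_table : List (String × Int)) : Option String :=
  let inverse_mapping := pvInverseMapping mass_table
  (pvBLoop inverse_mapping peptide_vector 0 []).map (fun peptide => PySem.Str.join "" peptide)

-- ===== PRECONDITION & SPEC =====
def Spec_restore_peptide_from_peptide_vector (peptide_vector : List Int) (mass_table : List (String × Int)) (out : Option String) : Prop := out = restore_peptide_from_peptide_vector_alt peptide_vector mass_table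
instance (peptide_vector : List Int) (mass_table : List (String × Int)) (out : Option String) : Decidable (Spec_restore_peptide_from_peptide_vector peptide_vector mass_table out) := by unfold Spec_restore_peptide_from_peptide_vector; infer_instance

-- ===== CLAIM (what is proved, stated in full; the proofs are below) =====
def Claim_equal_restore_peptide_from_peptide_vector : Prop := ∀ (peptide_vector : List Int) (mass_table : List (String × Int)), Dom_restore_peptide_from_peptide_vector peptide_vector mass_table → Spec_restore_peptide_from_peptide_vector peptide_vector mass_table (restore_peptide_from_peptide_vector peptide_vector mass_table)

-- ===== LEMMAS AND PROOFS =====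

-- 1-based positions of the 1-entries of v, starting index i (a proof-side characterisation of A's pass 1)
def pvPos (i : Int) (v : List Int) : List Int :=
  match v with
  | [] => []
  | x :: xs => if x == 1 then i :: pvPos (i + 1) xs else pvPos (i + 1) xs

theorem pvCalcPrefixGo_eq (v : List Int) : ∀ (ix : Int) (acc : List Int),
    pvCalcPrefixGo ix v acc = acc ++ pvPos ix v := by
  induction v with
  | nil => intro ix acc; simp [pvCalcPrefixGo, pvPos]
  | cons x xs ih =>
    intro ix acc
    by_cases hx : x = 1 <;> simp [pvCalcPrefixGo, pvPos, hx, ih]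

theorem pvLoop_key (inv : PySem.Dict Int String) (v : List Int) :
    ∀ (prev c : Int) (acc : List String),
    pvALoop inv ((prev :: pvPos (prev + c + 1) v).zip (pvPos (prev + c + 1) v)) acc
      = pvBLoop inv v c acc := by
  induction v with
  | nil => intro prev c acc; simp [pvPos, pvALoop, pvBLoop]
  | cons x xs ih =>
    intro prev c acc
    by_cases hx : x = 1
    · have h1 : prev + c + 1 + 1 = (prev + c + 1) + 0 + 1 := by ring
      have h2 : prev + c + 1 - prev = c + 1 := by ring
      simp only [pvPos, hx, if_pos, beq_self_eq_true, List.zip_cons_cons, pvALoop,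
        pvBLoop, h2, h1]
      cases inv.get? (c + 1) with
      | none => rfl
      | some aa => exact ih (prev + c + 1) 0 (acc ++ [aa])
    · have h1 : prev + c + 1 + 1 = prev + (c + 1) + 1 := by ring
      simp only [pvPos, hx, beq_iff_eq, if_false, pvBLoop]
      rw [h1]
      exact ih prev (c + 1) acc

-- ===== VERDICT (by name: the statement is the Claim_ definition above) =====
theorem restore_peptide_from_peptide_vector_spec : Claim_equal_restore_peptide_from_peptide_vector := by
  intro v mt _
  unfold Spec_restore_peptide_from_peptide_vector
  unfold restore_peptide_from_peptide_vector restore_peptide_from_peptide_vector_alt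
  simp only [calc_prefix_masses, pvCalcPrefixGo_eq, List.singleton_append, List.tail_cons]
  have h0 : (1 : Int) = 0 + 0 + 1 := by ring
  rw [h0, pvLoop_key]
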